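-- pv_equiv track=rewrite | github.com/SzymonKowalik/dyskretna_wiadomosc | main.py | sprawdz_negacje
-- ===== SOURCE A (Python) =====
-- def sprawdz_negacje(szyfrowane, przyklad):
--     """Sprawdza czy zaszyfrowany napis jest zanegowany czy nie"""
--     tabela_negacji = str.maketrans('01', '10')
--
--     bez_negacji = szyfrowane
--     z_negacja = szyfrowane.translate(tabela_negacji)
--
--     bez_negacji_zgodne = 0
--     z_negacja_zgodne = 0
--
--     for b, z, p in zip(bez_negacji, z_negacja, przyklad):
--         if b == p: bez_negacji_zgodne += 1
--         if z == p: z_negacja_zgodne += 1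
--     return '1' if z_negacja_zgodne > bez_negacji_zgodne else '0'
-- ===== SOURCE B (Python) =====
-- def sprawdz_negacje(szyfrowane, przyklad):
--     """Sprawdza czy zaszyfrowany napis jest zanegowany czy nie"""
--     pairs = [(s, q) for s, q in zip(szyfrowane, przyklad) if s in '01' and q in '01']
--     hamming = sum(s != q for s, q in pairs)
--     return '1' if 2 * hamming > len(pairs) else '0'
-- ===== Notes on version B (the rewrite author's own statement) =====
-- stated objective: simpler
-- what changed: B never builds the negated string and keeps no match counters: it filters the zipped positions to those where both characters are binary and returns '1' iff the Hamming distance on those positions exceeds half their count (2*hamming > len), using that non-binary positions contribute equally to both of A's counters.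
import Mathlib
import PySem

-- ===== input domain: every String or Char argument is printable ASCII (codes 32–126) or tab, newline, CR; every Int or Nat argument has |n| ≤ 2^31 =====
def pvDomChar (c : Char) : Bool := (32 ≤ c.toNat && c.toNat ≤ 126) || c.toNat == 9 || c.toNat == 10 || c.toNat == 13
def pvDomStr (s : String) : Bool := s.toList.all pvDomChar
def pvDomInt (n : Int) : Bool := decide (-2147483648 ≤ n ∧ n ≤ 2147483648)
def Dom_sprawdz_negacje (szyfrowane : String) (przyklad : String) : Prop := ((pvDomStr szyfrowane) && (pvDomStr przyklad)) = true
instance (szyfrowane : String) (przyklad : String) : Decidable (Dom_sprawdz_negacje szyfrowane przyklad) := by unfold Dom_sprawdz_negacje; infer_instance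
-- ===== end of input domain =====

-- B builds no negated string and keeps no match counters: it filters to the
-- positions where both characters are binary and tests whether the Hamming
-- distance there exceeds half their count (objective: simpler).

-- ===== PORT A =====
-- str.maketrans('01','10') as a character map: '0'↔'1', everything else unchanged (exact).
def pvTr (c : Char) : Char := if c = '0' then '1' else if c = '1' then '0' else c

def sprawdz_negacje (szyfrowane : String) (przyklad : String) : String :=
  let bez_negacji := szyfrowane
  let z_negacja := String.ofList (szyfrowane.toList.map pvTr)
  let counts : Int × Int :=
    ((bez_negacji.toList.zip z_negacja.toList).zip przyklad.toList).foldl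
      (fun (acc : Int × Int) (t : (Char × Char) × Char) =>
        (if t.1.1 = t.2 then acc.1 + 1 else acc.1,
         if t.1.2 = t.2 then acc.2 + 1 else acc.2)) (0, 0)
  if counts.2 > counts.1 then "1" else "0"

-- ===== PORT B =====
-- 's in "01"' ported as the two character comparisons (exact on any char).
def sprawdz_negacje_alt (szyfrowane : String) (przyklad : String) : String :=
  let pairs := (szyfrowane.toList.zip przyklad.toList).filter
    (fun sp => (sp.1 == '0' || sp.1 == '1') && (sp.2 == '0' || sp.2 == '1'))
  let hamming : Int := pairs.foldl
    (fun (acc : Int) (sp : Char × Char) => acc + (if sp.1 ≠ sp.2 then 1 else 0)) 0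
  if 2 * hamming > (pairs.length : Int) then "1" else "0"

-- ===== PRECONDITION & SPEC =====
def Spec_sprawdz_negacje (szyfrowane : String) (przyklad : String) (out : String) : Prop := out = sprawdz_negacje_alt szyfrowane przyklad
instance (szyfrowane : String) (przyklad : String) (out : String) : Decidable (Spec_sprawdz_negacje szyfrowane przyklad out) := by unfold Spec_sprawdz_negacje; infer_instance

-- ===== CLAIM (what is proved, stated in full; the proofs are below) =====
def Claim_equal_sprawdz_negacje : Prop := ∀ (szyfrowane : String) (przyklad : String), Dom_sprawdz_negacje szyfrowane przyklad → Spec_sprawdz_negacje szyfrowane przyklad (sprawdz_negacje szyfrowane przyklad)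

-- ===== LEMMAS AND PROOFS =====

-- per-position contribution to A's (z_negacja_zgodne - bez_negacji_zgodne)
def pvF (t : Char × Char) : Int :=
  (if pvTr t.1 = t.2 then 1 else 0) - (if t.1 = t.2 then 1 else 0)

-- B's filter predicate and its per-position contribution to 2*hamming - len
def pvBin (t : Char × Char) : Bool :=
  (t.1 == '0' || t.1 == '1') && (t.2 == '0' || t.2 == '1')

def pvW (t : Char × Char) : Int := if t.1 ≠ t.2 then 1 else 0

def pvG (t : Char × Char) : Int := if pvBin t then 2 * pvW t - 1 else 0

theorem pv_fg (t : Char × Char) : pvF t = pvG t := by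
  obtain ⟨s, q⟩ := t
  unfold pvF pvG pvBin pvW pvTr
  by_cases h0 : s = '0' <;> by_cases h1 : s = '1' <;>
    by_cases k0 : q = '0' <;> by_cases k1 : q = '1' <;>
      simp_all <;> split_ifs <;> simp_all [eq_comm]

-- zipping a list with its pvTr-image and then the example string
theorem pv_zip_tr (l p : List Char) :
    ((l.zip (l.map pvTr)).zip p)
      = (l.zip p).map (fun sp => ((sp.1, pvTr sp.1), sp.2)) := by
  induction l generalizing p with
  | nil => simp
  | cons c l ih =>
    cases p with
    | nil => simp
    | cons q p => simp [ih]

-- A's two counters fold: difference = sum of pvF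
theorem pv_keyA (L : List (Char × Char)) (b z : Int) :
    (L.foldl (fun (acc : Int × Int) (t : Char × Char) =>
        (if t.1 = t.2 then acc.1 + 1 else acc.1,
         if pvTr t.1 = t.2 then acc.2 + 1 else acc.2)) (b, z)).2
    - (L.foldl (fun (acc : Int × Int) (t : Char × Char) =>
        (if t.1 = t.2 then acc.1 + 1 else acc.1,
         if pvTr t.1 = t.2 then acc.2 + 1 else acc.2)) (b, z)).1
    = z - b + (L.map pvF).sum := by
  induction L generalizing b z with
  | nil => simp
  | cons t L ih =>
    simp only [List.foldl_cons, List.map_cons, List.sum_cons]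
    rw [ih]
    simp only [pvF]
    split_ifs <;> ring

-- additive fold is the starting value plus the sum of the weights
theorem pv_foldl_addw (w : Char × Char → Int) (L : List (Char × Char)) (h : Int) :
    L.foldl (fun a x => a + w x) h = h + (L.map w).sum := by
  induction L generalizing h with
  | nil => simp
  | cons t L ih => simp [ih]; ring

-- B's combination over the filtered list = sum of pvG over the whole list
theorem pv_keyB (L : List (Char × Char)) :
    2 * ((L.filter pvBin).map pvW).sum - ((L.filter pvBin).length : Int)
      = (L.map pvG).sum := by
  induction L with
  | nil => simp
  | cons t L ih =>
    by_cases h : pvBin t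
    · simp only [List.filter_cons, h, if_pos, List.map_cons, List.sum_cons,
        List.length_cons, pvG]
      push_cast
      rw [← ih]
      ring
    · simp only [List.filter_cons, h, Bool.false_eq_true, if_neg, not_false_iff,
        List.map_cons, List.sum_cons, pvG]
      rw [← ih]
      ring

-- ===== VERDICT (by name: the statement is the Claim_ definition above) =====
theorem sprawdz_negacje_spec : Claim_equal_sprawdz_negacje := by
  intro sz p _
  unfold Spec_sprawdz_negacje sprawdz_negacje sprawdz_negacje_alt
  simp only [String.toList_ofList, pv_zip_tr, List.foldl_map]
  rw [show (fun sp : Char × Char => (sp.1 == '0' || sp.1 == '1') && (sp.2 == '0' || sp.2 == '1')) = pvBin from rfl]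
  rw [show (fun (acc : Int) (sp : Char × Char) => acc + (if sp.1 ≠ sp.2 then (1 : Int) else 0)) = (fun a x => a + pvW x) from rfl]
  rw [pv_foldl_addw pvW ((sz.toList.zip p.toList).filter pvBin) 0]
  have hA := pv_keyA (sz.toList.zip p.toList) 0 0
  have hB := pv_keyB (sz.toList.zip p.toList)
  have hfg : ((sz.toList.zip p.toList).map pvF).sum
      = ((sz.toList.zip p.toList).map pvG).sum := by
    rw [funext pv_fg]
  split_ifs with h1 h2 <;> first | rfl | (exfalso; omega)
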